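-- pv_equiv track=rewrite | github.com/pypi-data/pypi-mirror-187 | packages/wammodels/wammodels-0.0.4-py3-none-any.whl/wammodels/descomp.py | new_formula
-- ===== SOURCE A (Python) =====
-- def new_formula(formula_get,get_var_prepare):
--     v_lag   =  [i[1]["lag"] if len(i) > 1 and "lag" in i[1] else 0 for i in get_var_prepare]
--     formula_array =  formula_get.replace("+","").replace("~","").split()
--     new_formula = ""
--     for key,valor in enumerate(v_lag):
--         if key == 1:
--             new_formula += " ~ "
--         if key > 1:
--             new_formula += " + "
--         if valor != 0:
--             formula_array[key] = f"{formula_array[key]}.shift({valor})"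
--         new_formula += formula_array[key]
--     return new_formula
-- ===== SOURCE B (Python) =====
-- def new_formula(formula_get, get_var_prepare):
--     tokens = formula_get.replace("+", "").replace("~", "").split()
--     n = len(get_var_prepare)
--
--     def dec(k):
--         i = get_var_prepare[k]
--         lag = i[1]["lag"] if len(i) > 1 and "lag" in i[1] else 0
--         t = tokens[k]
--         return t if lag == 0 else f"{t}.shift({lag})"
--
--     out = ""
--     for k in reversed(range(2, n)):
--         out = " + " + dec(k) + out
--     if n >= 2:
--         out = " ~ " + dec(1) + out
--     if n >= 1:
--         out = dec(0) + out
--     return out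
-- ===== Notes on version B (the rewrite author's own statement) =====
-- stated objective: alternative
-- what changed: B builds the result back-to-front: it walks the indices in reverse, prepending ' + ' + token for each index >= 2, then prepends the ' ~ ' part and the head, instead of A's forward pass that branches on key==1/key>1 per iteration and mutates the token array in place.
import Mathlib
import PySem

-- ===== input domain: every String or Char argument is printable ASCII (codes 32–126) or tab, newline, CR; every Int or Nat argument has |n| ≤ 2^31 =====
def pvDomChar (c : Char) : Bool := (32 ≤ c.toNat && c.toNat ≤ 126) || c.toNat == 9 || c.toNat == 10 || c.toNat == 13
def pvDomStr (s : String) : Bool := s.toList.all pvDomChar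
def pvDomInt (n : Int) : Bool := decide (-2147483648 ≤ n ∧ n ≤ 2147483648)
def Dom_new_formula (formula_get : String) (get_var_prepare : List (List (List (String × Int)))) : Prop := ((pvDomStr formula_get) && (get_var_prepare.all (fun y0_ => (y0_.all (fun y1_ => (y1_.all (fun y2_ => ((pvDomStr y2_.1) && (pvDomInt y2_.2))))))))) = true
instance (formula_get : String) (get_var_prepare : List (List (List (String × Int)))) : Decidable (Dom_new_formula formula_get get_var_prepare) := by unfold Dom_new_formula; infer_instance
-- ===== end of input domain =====

-- B builds the result BACK-TO-FRONT: it walks the indices in reverse, prepending " + " + token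
-- for each index >= 2, then prepends the " ~ " part and the head token, instead of A's forward
-- accumulation with per-iteration key==1/key>1 branching and in-place token-array mutation (objective: alternative).

-- shared helper: value of `i[1]["lag"] if len(i) > 1 and "lag" in i[1] else 0`
-- (the dict i[1] is an association list; lookup = first match)
def pvLagOf (i : List (List (String × Int))) : Int :=
  if 1 < i.length then (List.lookup "lag" (PySem.List.pyGetD i 1 [])).getD 0 else 0

-- tokens of formula_get.replace("+","").replace("~","").split()
def pvTokens (formula_get : String) : List (List Char) :=
  PySem.Chars.split₀ (PySem.Chars.replace (PySem.Chars.replace formula_get.toList "+".toList "".toList) "~".toList "".toList)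

-- the shifted form of one token
def pvShift (tok : List Char) (v : Int) : List Char :=
  tok ++ ".shift(".toList ++ PySem.Int.toChars v ++ ")".toList

-- ===== PORT A =====
-- A's loop body (key, valor) over enumerate(v_lag); state = (formula_array, new_formula)
def pvStepA (st : List (List Char) × List Char) (kv : Int × Int) : List (List Char) × List Char :=
  let nf1 := if kv.1 = 1 then st.2 ++ " ~ ".toList else st.2
  let nf2 := if 1 < kv.1 then nf1 ++ " + ".toList else nf1
  let fa := if kv.2 ≠ 0 then
      PySem.List.pySetD st.1 kv.1 (pvShift (PySem.List.pyGetD st.1 kv.1 []) kv.2)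
    else st.1
  (fa, nf2 ++ PySem.List.pyGetD fa kv.1 [])

def new_formula (formula_get : String) (get_var_prepare : List (List (List (String × Int)))) : String :=
  let v_lag : List Int := get_var_prepare.map pvLagOf
  let formula_array := pvTokens formula_get
  let res := (PySem.List.enumerate v_lag 0).foldl pvStepA (formula_array, [])
  String.mk res.2

-- ===== PORT B =====
-- Source B's dec(k): the (possibly shifted) token at index k
def pvDecB (tokens : List (List Char)) (get_var_prepare : List (List (List (String × Int)))) (k : Int) : List Char :=
  let i := PySem.List.pyGetD get_var_prepare k []
  let lag := pvLagOf i
  let t := PySem.List.pyGetD tokens k []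
  if lag = 0 then t else pvShift t lag

def new_formula_alt (formula_get : String) (get_var_prepare : List (List (List (String × Int)))) : String :=
  let tokens := pvTokens formula_get
  let n : Int := get_var_prepare.length
  -- for k in reversed(range(2, n)): out = " + " + dec(k) + out
  let out0 := ((PySem.List.pyRange 2 n 1).reverse).foldl
      (fun out k => " + ".toList ++ pvDecB tokens get_var_prepare k ++ out) []
  let out1 := if 2 ≤ n then " ~ ".toList ++ pvDecB tokens get_var_prepare 1 ++ out0 else out0
  let out2 := if 1 ≤ n then pvDecB tokens get_var_prepare 0 ++ out1 else out1
  String.mk out2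

-- ===== PRECONDITION & SPEC =====
-- Pre_ excludes exactly the inputs where get_var_prepare is longer than the token list,
-- on which the Python A (and B) raise IndexError at formula_array[key] / tokens[k].
def Pre_new_formula (formula_get : String) (get_var_prepare : List (List (List (String × Int)))) : Prop :=
  get_var_prepare.length ≤ (pvTokens formula_get).length
instance (formula_get : String) (get_var_prepare : List (List (List (String × Int)))) : Decidable (Pre_new_formula formula_get get_var_prepare) := by unfold Pre_new_formula; infer_instance

def pvWitness_new_formula : String × (List (List (List (String × Int)))) :=
  ("y ~ x1 + x2", [[[("a", 1)]], [[], [("lag", 2)]], [[], [("lag", 0)]]])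

def Spec_new_formula (formula_get : String) (get_var_prepare : List (List (List (String × Int)))) (out : String) : Prop := out = new_formula_alt formula_get get_var_prepare
instance (formula_get : String) (get_var_prepare : List (List (List (String × Int)))) (out : String) : Decidable (Spec_new_formula formula_get get_var_prepare out) := by unfold Spec_new_formula; infer_instance

-- ===== CLAIM (what is proved, stated in full; the proofs are below) =====
def Claim_equal_new_formula : Prop := ∀ (formula_get : String) (get_var_prepare : List (List (List (String × Int)))), Dom_new_formula formula_get get_var_prepare → Pre_new_formula formula_get get_var_prepare → Spec_new_formula formula_get get_var_prepare (new_formula formula_get get_var_prepare)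

-- ===== LEMMAS AND PROOFS =====

theorem enumerate_cons {α : Type} (g : α) (tl : List α) (s : Int) :
    PySem.List.enumerate (g :: tl) s = (s, g) :: PySem.List.enumerate tl (s + 1) := by
  simp [PySem.List.enumerate]

theorem enumerate_map {α β : Type} (f : α → β) (xs : List α) (s : Int) :
    PySem.List.enumerate (xs.map f) s = (PySem.List.enumerate xs s).map (fun kv => (kv.1, f kv.2)) := by
  induction xs generalizing s with
  | nil => simp [PySem.List.enumerate]
  | cons x t ih => simp [PySem.List.enumerate, ih]

theorem pvGetD_set_self {α : Type} (l : List α) (k : Nat) (v d : α) (h : k < l.length) :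
    (l.set k v).getD k d = v := by
  simp [List.getD, h]

theorem pvGetD_set_ne {α : Type} (l : List α) (k m : Nat) (v d : α) (h : k ≠ m) :
    (l.set k v).getD m d = l.getD m d := by
  simp [List.getD, List.getElem?_set_ne, h]

-- A's fold over indices ≥ 2: each step appends " + " ++ emitted token
theorem auxA (gvp : List (List (List (String × Int)))) :
    ∀ (k : Nat) (fa : List (List Char)) (nf : List Char),
      2 ≤ k → k + gvp.length ≤ fa.length →
      (((PySem.List.enumerate gvp (k : Int)).map (fun kv => (kv.1, pvLagOf kv.2))).foldl pvStepA (fa, nf)).2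
        = nf ++ ((List.range gvp.length).map
            (fun i => " + ".toList ++
              (if pvLagOf (gvp.getD i []) = 0 then fa.getD (k + i) []
               else pvShift (fa.getD (k + i) []) (pvLagOf (gvp.getD i []))))).flatten := by
  induction gvp with
  | nil => intro k fa nf _ _; simp [PySem.List.enumerate]
  | cons g tl ih =>
    intro k fa nf hk hlen
    have hklt : k < fa.length := by simp at hlen; omega
    rw [enumerate_cons]
    simp only [List.map_cons, List.foldl_cons]
    have hstep : pvStepA (fa, nf) ((k : Int), pvLagOf g)
        = ((if pvLagOf g ≠ 0 then PySem.List.pySetD fa (k : Int) (pvShift (fa.getD k []) (pvLagOf g)) else fa),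
           nf ++ " + ".toList ++
             (if pvLagOf g = 0 then fa.getD k [] else pvShift (fa.getD k []) (pvLagOf g))) := by
      unfold pvStepA
      have h1 : ¬ ((k : Int) = 1) := by omega
      have h2 : (1 : Int) < (k : Int) := by omega
      by_cases hz : pvLagOf g = 0
      · simp [h1, h2, hz, PySem.List.pyGetD_natCast]
      · simp only [h1, if_false, h2, if_true, hz, ne_eq, not_false_iff]
        simp [PySem.List.pyGetD_natCast, PySem.List.pySetD_natCast]
        exact pvGetD_set_self fa k _ [] hklt
    rw [hstep]
    by_cases hz : pvLagOf g = 0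
    · simp only [hz, ne_eq, not_true_eq_false, if_false, ite_true]
      have := ih (k + 1) fa (nf ++ " + ".toList ++ fa.getD k []) (by omega) (by simp at hlen ⊢; omega)
      rw [show ((k : Int) + 1) = (((k + 1 : Nat)) : Int) by push_cast; ring]
      rw [this]
      have hmap : List.map
            ((fun i => " + ".toList ++
                if pvLagOf ((g :: tl).getD i []) = 0 then fa.getD (k + i) []
                else pvShift (fa.getD (k + i) []) (pvLagOf ((g :: tl).getD i []))) ∘ Nat.succ)
            (List.range tl.length)
          = List.map
            (fun i => " + ".toList ++
                if pvLagOf (tl.getD i []) = 0 then fa.getD (k + 1 + i) []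
                else pvShift (fa.getD (k + 1 + i) []) (pvLagOf (tl.getD i [])))
            (List.range tl.length) := by
        apply List.map_congr_left
        intro i _
        simp only [Function.comp_apply, Nat.succ_eq_add_one, List.getD_cons_succ]
        have e : k + (i + 1) = k + 1 + i := by omega
        rw [e]
      simp only [List.length_cons]
      rw [List.range_succ_eq_map]
      simp only [List.map_cons, List.map_map, hmap, List.flatten_cons, List.getD_cons_zero,
        Nat.add_zero, hz, if_true, List.append_assoc]
    · simp only [hz, ne_eq, not_false_iff, if_true, ite_false]
      set fa2 := PySem.List.pySetD fa (k : Int) (pvShift (fa.getD k []) (pvLagOf g)) with hfa2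
      have hlen2 : fa2.length = fa.length := by rw [hfa2]; exact PySem.List.length_pySetD _ _ _
      have := ih (k + 1) fa2 (nf ++ " + ".toList ++ pvShift (fa.getD k []) (pvLagOf g)) (by omega)
        (by simp at hlen; omega)
      rw [show ((k : Int) + 1) = (((k + 1 : Nat)) : Int) by push_cast; ring]
      rw [this]
      have hmap : List.map
            ((fun i => " + ".toList ++
                if pvLagOf ((g :: tl).getD i []) = 0 then fa.getD (k + i) []
                else pvShift (fa.getD (k + i) []) (pvLagOf ((g :: tl).getD i []))) ∘ Nat.succ)
            (List.range tl.length)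
          = List.map
            (fun i => " + ".toList ++
                if pvLagOf (tl.getD i []) = 0 then fa2.getD (k + 1 + i) []
                else pvShift (fa2.getD (k + 1 + i) []) (pvLagOf (tl.getD i [])))
            (List.range tl.length) := by
        apply List.map_congr_left
        intro i _
        have hidx : fa2.getD (k + 1 + i) [] = fa.getD (k + 1 + i) [] := by
          rw [hfa2, PySem.List.pySetD_natCast]
          exact pvGetD_set_ne fa k (k + 1 + i) _ [] (by omega)
        simp only [Function.comp_apply, Nat.succ_eq_add_one, List.getD_cons_succ, hidx]
        have e : k + (i + 1) = k + 1 + i := by omega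
        rw [e]
      simp only [List.length_cons]
      rw [List.range_succ_eq_map]
      simp only [List.map_cons, List.map_map, hmap, List.flatten_cons, List.getD_cons_zero,
        Nat.add_zero, hz, if_false, List.append_assoc]

-- B's back-to-front prepend loop equals the flatten of the forward map
theorem foldl_prepend (f : Int → List Char) :
    ∀ (l : List Int) (acc : List Char),
      l.foldl (fun out k => f k ++ out) acc = (l.reverse.map f).flatten ++ acc := by
  intro l
  induction l with
  | nil => intro acc; simp
  | cons x t ih => intro acc; simp [ih, List.append_assoc]

theorem pvGetD_int_zero {α : Type} (xs : List α) (d : α) :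
    PySem.List.pyGetD xs (0 : Int) d = xs.getD 0 d := by
  rw [show (0 : Int) = ((0 : Nat) : Int) by simp, PySem.List.pyGetD_natCast]

theorem pvGetD_int_one {α : Type} (xs : List α) (d : α) :
    PySem.List.pyGetD xs (1 : Int) d = xs.getD 1 d := by
  rw [show (1 : Int) = ((1 : Nat) : Int) by simp, PySem.List.pyGetD_natCast]

theorem pvSetD_int_zero {α : Type} (xs : List α) (v : α) :
    PySem.List.pySetD xs (0 : Int) v = xs.set 0 v := by
  rw [show (0 : Int) = ((0 : Nat) : Int) by simp, PySem.List.pySetD_natCast]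

theorem pvSetD_int_one {α : Type} (xs : List α) (v : α) :
    PySem.List.pySetD xs (1 : Int) v = xs.set 1 v := by
  rw [show (1 : Int) = ((1 : Nat) : Int) by simp, PySem.List.pySetD_natCast]

-- B's tail loop, flattened to the per-index form used to compare with A
theorem auxB (toks : List (List Char)) (g0 g1 : List (List (String × Int)))
    (tl : List (List (List (String × Int)))) :
    ((PySem.List.pyRange 2 ((tl.length : Int) + 2) 1).reverse).foldl
        (fun out k => " + ".toList ++ pvDecB toks (g0 :: g1 :: tl) k ++ out) []
      = ((List.range tl.length).map
          (fun i => " + ".toList ++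
            (if pvLagOf (tl.getD i []) = 0 then toks.getD (2 + i) []
             else pvShift (toks.getD (2 + i) []) (pvLagOf (tl.getD i []))))).flatten := by
  rw [foldl_prepend, List.reverse_reverse, List.append_nil]
  congr 1
  apply List.ext_getElem
  · simp only [List.length_map, PySem.List.length_pyRange_one, List.length_range]
    omega
  · intro i h1 h2
    simp only [List.getElem_map, PySem.List.getElem_pyRange_one, List.getElem_range]
    unfold pvDecB
    have hc : (2 : Int) + (i : Int) = (((2 + i : Nat)) : Int) := by push_cast; ring
    rw [hc, PySem.List.pyGetD_natCast, PySem.List.pyGetD_natCast]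
    simp only [show 2 + i = i + 1 + 1 from by omega, List.getD_cons_succ]

theorem main_eq (formula_get : String) (gvp : List (List (List (String × Int))))
    (hpre : gvp.length ≤ (pvTokens formula_get).length) :
    new_formula formula_get gvp = new_formula_alt formula_get gvp := by
  unfold new_formula new_formula_alt
  simp only []
  set toks := pvTokens formula_get with htoks
  rw [enumerate_map]
  match gvp, hpre with
  | [], _ =>
    simp [PySem.List.enumerate, PySem.List.pyRange_one_eq_nil (by decide : (0:Int) ≤ 2)]
  | [g], hpre =>
    have h0 : 0 < toks.length := by simpa using hpre
    simp only [PySem.List.enumerate, List.map_cons, List.map_nil, List.foldl_cons, List.foldl_nil]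
    rw [show (([g] : List (List (List (String × Int)))).length : Int) = 1 from by simp]
    rw [PySem.List.pyRange_one_eq_nil (by decide : (1:Int) ≤ 2)]
    simp only [List.reverse_nil, List.foldl_nil,
      show ¬ ((2:Int) ≤ 1) by decide, if_false,
      show ((1:Int) ≤ 1) by decide, if_true]
    unfold pvDecB
    simp only [pvGetD_int_zero, List.getD_cons_zero]
    by_cases hz : pvLagOf g = 0
    · simp [pvStepA, hz, pvGetD_int_zero]
    · simp [pvStepA, hz, pvGetD_int_zero, pvSetD_int_zero,
        show ¬ ((0:Int) = 1) by decide, show ¬ ((1:Int) < 0) by decide]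
      exact congrArg String.mk (pvGetD_set_self toks 0 _ [] h0)
  | g0 :: g1 :: tl, hpre =>
    have hlen : tl.length + 2 ≤ toks.length := by simp at hpre; omega
    have h0 : 0 < toks.length := by omega
    have h1 : 1 < toks.length := by omega
    rw [enumerate_cons, enumerate_cons]
    simp only [List.map_cons, List.foldl_cons, zero_add]
    -- step at key 0
    have hs0 : pvStepA (toks, []) ((0 : Int), pvLagOf g0)
        = ((if pvLagOf g0 = 0 then toks else toks.set 0 (pvShift (toks.getD 0 []) (pvLagOf g0))),
           (if pvLagOf g0 = 0 then toks.getD 0 [] else pvShift (toks.getD 0 []) (pvLagOf g0))) := by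
      by_cases hz : pvLagOf g0 = 0 <;>
        simp [pvStepA, hz, pvGetD_int_zero, pvSetD_int_zero,
          show ¬ ((0:Int) = 1) by decide, show ¬ ((1:Int) < 0) by decide, h0]
    rw [hs0]
    set fa1 := (if pvLagOf g0 = 0 then toks else toks.set 0 (pvShift (toks.getD 0 []) (pvLagOf g0))) with hfa1
    set e0 := (if pvLagOf g0 = 0 then toks.getD 0 [] else pvShift (toks.getD 0 []) (pvLagOf g0)) with he0
    have hfa1len : fa1.length = toks.length := by
      rw [hfa1]; by_cases hz : pvLagOf g0 = 0 <;> simp [hz]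
    have hfa1get : ∀ (m : Nat), 0 < m → fa1.getD m [] = toks.getD m [] := by
      intro m hm
      rw [hfa1]
      by_cases hz : pvLagOf g0 = 0
      · simp [hz]
      · simp only [hz, if_false]
        exact pvGetD_set_ne toks 0 m _ [] (by omega)
    -- step at key 1
    have hs1 : pvStepA (fa1, e0) ((1 : Int), pvLagOf g1)
        = ((if pvLagOf g1 = 0 then fa1 else fa1.set 1 (pvShift (toks.getD 1 []) (pvLagOf g1))),
           e0 ++ " ~ ".toList ++
             (if pvLagOf g1 = 0 then toks.getD 1 [] else pvShift (toks.getD 1 []) (pvLagOf g1))) := by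
      have h1' : 1 < fa1.length := by omega
      by_cases hz : pvLagOf g1 = 0
      · simp [pvStepA, hz, pvGetD_int_one]
        exact hfa1get 1 (by omega)
      · have hg : fa1[1]?.getD ([] : List Char) = toks[1]?.getD [] := hfa1get 1 (by omega)
        simp [pvStepA, hz, pvGetD_int_one, pvSetD_int_one]
        rw [hg]
        constructor
        · rfl
        · exact pvGetD_set_self fa1 1 _ [] h1'
    rw [hs1]
    set fa2 := (if pvLagOf g1 = 0 then fa1 else fa1.set 1 (pvShift (toks.getD 1 []) (pvLagOf g1))) with hfa2
    set e1 := (if pvLagOf g1 = 0 then toks.getD 1 [] else pvShift (toks.getD 1 []) (pvLagOf g1)) with he1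
    have hfa2len : fa2.length = toks.length := by
      rw [hfa2]; by_cases hz : pvLagOf g1 = 0 <;> simp [hz, hfa1len]
    have hfa2get : ∀ (m : Nat), 1 < m → fa2.getD m [] = toks.getD m [] := by
      intro m hm
      rw [hfa2]
      by_cases hz : pvLagOf g1 = 0
      · simp only [hz, if_true]
        exact hfa1get m (by omega)
      · simp only [hz, if_false]
        rw [pvGetD_set_ne fa1 1 m _ [] (by omega)]
        exact hfa1get m (by omega)
    rw [show ((1 : Int) + 1) = ((2 : Nat) : Int) by decide]
    rw [auxA tl 2 fa2 (e0 ++ " ~ ".toList ++ e1) (by omega) (by omega)]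
    -- A's tail entries only read fa2 above index 1, where it agrees with toks
    have hmapA : List.map
          (fun i => " + ".toList ++
            (if pvLagOf (tl.getD i []) = 0 then fa2.getD (2 + i) []
             else pvShift (fa2.getD (2 + i) []) (pvLagOf (tl.getD i []))))
          (List.range tl.length)
        = List.map
          (fun i => " + ".toList ++
            (if pvLagOf (tl.getD i []) = 0 then toks.getD (2 + i) []
             else pvShift (toks.getD (2 + i) []) (pvLagOf (tl.getD i []))))
          (List.range tl.length) := by
      apply List.map_congr_left
      intro i _
      rw [hfa2get (2 + i) (by omega)]
    rw [hmapA]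
    -- now reduce the B side
    have hn : ((g0 :: g1 :: tl).length : Int) = (tl.length : Int) + 2 := by
      simp; ring
    rw [hn, auxB toks g0 g1 tl]
    have h2n : (2 : Int) ≤ (tl.length : Int) + 2 := by omega
    have h1n : (1 : Int) ≤ (tl.length : Int) + 2 := by omega
    simp only [h2n, if_true, h1n]
    unfold pvDecB
    simp only [pvGetD_int_zero, pvGetD_int_one, List.getD_cons_zero, List.getD_cons_succ,
      ← he0, ← he1, List.append_assoc]

-- ===== VERDICT (by name: the statement is the Claim_ definition above) =====
theorem new_formula_spec : Claim_equal_new_formula := by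
  intro formula_get gvp _ hpre
  unfold Spec_new_formula
  exact main_eq formula_get gvp hpre
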